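-- pv_equiv track=rewrite | github.com/fortra/impacket | impacket/examples/ntlmrelayx/attacks/rpcattack.py | _xml_escape
-- ===== SOURCE A (Python) =====
-- def _xml_escape(data):
--     replace_table = {
--          "&": "&amp;",
--          '"': "&quot;",
--          "'": "&apos;",
--          ">": "&gt;",
--          "<": "&lt;",
--          }
--     return ''.join(replace_table.get(c, c) for c in data)
-- ===== SOURCE B (Python) =====
-- def _xml_escape(data):
--     data = data.replace("&", "&amp;")
--     data = data.replace('"', "&quot;")
--     data = data.replace("'", "&apos;")
--     data = data.replace(">", "&gt;")
--     data = data.replace("<", "&lt;")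
--     return data
-- ===== Notes on version B (the rewrite author's own statement) =====
-- stated objective: faster
-- what changed: Replaces the single per-character dict-lookup pass by five sequential str.replace scans, with the ampersand replacement performed first so replacement output is never re-escaped.
import Mathlib
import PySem

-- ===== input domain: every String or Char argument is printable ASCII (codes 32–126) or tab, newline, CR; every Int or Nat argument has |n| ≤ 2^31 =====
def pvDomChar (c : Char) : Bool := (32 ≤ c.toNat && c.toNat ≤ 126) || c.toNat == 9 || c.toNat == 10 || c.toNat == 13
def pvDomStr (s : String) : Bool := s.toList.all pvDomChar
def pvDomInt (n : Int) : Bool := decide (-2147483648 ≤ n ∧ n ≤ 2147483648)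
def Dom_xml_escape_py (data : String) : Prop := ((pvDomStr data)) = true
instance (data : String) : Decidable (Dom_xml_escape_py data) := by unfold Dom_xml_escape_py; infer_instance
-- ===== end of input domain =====

-- B replaces A's single per-character dict-lookup pass by five sequential str.replace scans ('&' first); same result, idiomatic decomposition.

-- ===== PORT A =====
-- literal port: build the replace table, then join table.get(c, c) over the characters
def xml_escape_py (data : String) : String :=
  let replace_table : PySem.Dict String String :=
    ⟨[("&", "&amp;"), ("\"", "&quot;"), ("'", "&apos;"), (">", "&gt;"), ("<", "&lt;")]⟩
  PySem.Str.join "" (data.toList.map (fun c =>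
    PySem.Dict.getD replace_table (String.ofList [c]) (String.ofList [c])))

-- ===== PORT B =====
def xml_escape_py_alt (data : String) : String :=
  let d1 := PySem.Str.replace data "&" "&amp;"
  let d2 := PySem.Str.replace d1 "\"" "&quot;"
  let d3 := PySem.Str.replace d2 "'" "&apos;"
  let d4 := PySem.Str.replace d3 ">" "&gt;"
  PySem.Str.replace d4 "<" "&lt;"

-- ===== PRECONDITION & SPEC =====
def Spec_xml_escape_py (data : String) (out : String) : Prop := out = xml_escape_py_alt data
instance (data : String) (out : String) : Decidable (Spec_xml_escape_py data out) := by unfold Spec_xml_escape_py; infer_instance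

-- ===== CLAIM (what is proved, stated in full; the proofs are below) =====
def Claim_equal_xml_escape_py : Prop := ∀ (data : String), Dom_xml_escape_py data → Spec_xml_escape_py data (xml_escape_py data)

-- ===== LEMMAS AND PROOFS =====

-- per-character substitution function, used only in the proofs
def pvSub (a : Char) (new : List Char) (c : Char) : List Char := if c = a then new else [c]

theorem pv_go_single (a : Char) (new : List Char) :
    ∀ (fuel : Nat) (l acc : List Char), l.length ≤ fuel →
      PySem.Chars.replace.go [a] new fuel l acc = acc.reverse ++ l.flatMap (pvSub a new) := by
  intro fuel
  induction fuel with
  | zero =>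
      intro l acc h
      have : l = [] := List.eq_nil_of_length_eq_zero (Nat.le_zero.mp h)
      subst this; simp [PySem.Chars.replace.go]
  | succ n ih =>
      intro l acc h
      cases l with
      | nil => simp [PySem.Chars.replace.go]
      | cons c t =>
          simp only [PySem.Chars.replace.go, List.isPrefixOf]
          by_cases hc : c = a
          · subst hc
            simp only [BEq.rfl, Bool.true_and, if_pos, List.length_cons, List.length_nil,
                       Nat.zero_add, List.drop_succ_cons, List.drop_zero]
            rw [ih t (new.reverse ++ acc) (by simpa using Nat.le_of_succ_le_succ h)]
            simp [pvSub, List.flatMap_cons]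
          · have hac : (a == c) = false := by
              simp only [beq_eq_false_iff_ne, ne_eq]
              intro h'; exact hc h'.symm
            simp only [hac, Bool.false_and, Bool.false_eq_true, if_false]
            rw [ih t (c :: acc) (by simpa using Nat.le_of_succ_le_succ h)]
            simp [pvSub, hc, List.flatMap_cons]

theorem pv_replace_single (a : Char) (new s : List Char) :
    PySem.Chars.replace s [a] new = s.flatMap (pvSub a new) := by
  simp only [PySem.Chars.replace, List.isEmpty]
  exact pv_go_single a new s.length s [] le_rfl

theorem pv_join_nil (l : List (List Char)) : PySem.Chars.join [] l = l.flatten := by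
  induction l with
  | nil => simp [PySem.Chars.join, List.intercalate]
  | cons x xs ih =>
      have h : List.intercalate ([] : List Char) (x :: xs) = x ++ List.intercalate [] xs := by
        simp [List.intercalate]; cases xs <;> simp
      simp only [PySem.Chars.join] at ih ⊢
      rw [h, ih, List.flatten_cons]

theorem pv_beq_false (s : String) (c : Char) (h : ¬ s.toList = [c]) : (s == String.ofList [c]) = false := by
  simp only [beq_eq_false_iff_ne, ne_eq]
  intro hh
  exact h (by simpa using congrArg String.toList hh)

-- the composed effect of the five sequential substitutions on one character
theorem pv_compose (c : Char) :
    (((((pvSub '&' "&amp;".toList c).flatMap (pvSub '"' "&quot;".toList)).flatMap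
        (pvSub '\'' "&apos;".toList)).flatMap (pvSub '>' "&gt;".toList)).flatMap
        (pvSub '<' "&lt;".toList)) =
    (PySem.Dict.getD
      (⟨[("&", "&amp;"), ("\"", "&quot;"), ("'", "&apos;"), (">", "&gt;"), ("<", "&lt;")]⟩ : PySem.Dict String String)
      (String.ofList [c]) (String.ofList [c])).toList := by
  by_cases h1 : c = '&'; · subst h1; decide
  by_cases h2 : c = '"'; · subst h2; decide
  by_cases h3 : c = '\''; · subst h3; decide
  by_cases h4 : c = '>'; · subst h4; decide
  by_cases h5 : c = '<'; · subst h5; decide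
  have e1 := pv_beq_false "&" c (by simpa [eq_comm] using h1)
  have e2 := pv_beq_false "\"" c (by simpa [eq_comm] using h2)
  have e3 := pv_beq_false "'" c (by simpa [eq_comm] using h3)
  have e4 := pv_beq_false ">" c (by simpa [eq_comm] using h4)
  have e5 := pv_beq_false "<" c (by simpa [eq_comm] using h5)
  simp [pvSub, h1, h2, h3, h4, h5, PySem.Dict.getD, PySem.Dict.get?, List.find?,
        e1, e2, e3, e4, e5]

-- ===== VERDICT (by name: the statement is the Claim_ definition above) =====
theorem xml_escape_py_spec : Claim_equal_xml_escape_py := by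
  intro data _
  unfold Spec_xml_escape_py xml_escape_py xml_escape_py_alt
  apply String.toList_inj.mp
  simp only [PySem.Str.toList_replace, PySem.Str.toList_join]
  rw [show ("&" : String).toList = ['&'] from rfl, show ("\"" : String).toList = ['"'] from rfl,
      show ("'" : String).toList = ['\''] from rfl, show (">" : String).toList = ['>'] from rfl,
      show ("<" : String).toList = ['<'] from rfl]
  simp only [pv_replace_single]
  rw [show ("" : String).toList = [] from rfl, List.map_map, pv_join_nil,
      ← List.flatMap_def]
  refine Eq.symm ?_
  simp only [List.flatMap_assoc]
  refine List.flatMap_congr fun c _ => ?_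
  have h := pv_compose c
  simp only [List.flatMap_assoc] at h
  simpa [Function.comp] using h
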